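-- pv_equiv track=rewrite | github.com/ynput/OpenPype | openpype/hosts/openrv/startup/pkgs_source/comments/comments.py | get_cycle_frame
-- ===== SOURCE A (Python) =====
-- def get_cycle_frame(frame=None, frames_lookup=None, direction="next"):
--     """Return nearest frame in direction in frames lookup.
--
--     If the nearest frame in that direction does not exist then cycle
--     over to the frames taking the first entry at the other end.
--
--     Note:
--         This function can return None if there are no frames to lookup in.
--
--     Args:
--         frame (int): frame to search from
--         frames_lookup (list): frames to search in.
--         direction (str, optional): search direction, either "next" or "prev"
--             Defaults to "next".
--
--     Returns:
--         int or None: The nearest frame number in that direction or None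
--             if no lookup frames were passed.
--
--     """
--     if direction not in {"prev", "next"}:
--         raise ValueError("Direction must be either 'next' or 'prev'. "
--                          "Got: {}".format(direction))
--
--     if not frames_lookup:
--         return
--
--     elif len(frames_lookup) == 1:
--         return frames_lookup[0]
--
--     # TODO: We could skip this sorting if we knew the input list was sorted
--     frames_lookup = list(sorted(frames_lookup))
--     if direction == "next":
--         # Return next nearest number or cycle to the lowest number
--         return next((i for i in frames_lookup if i > frame),
--                     frames_lookup[0])
--     elif direction == "prev":
--         # Return previous nearest number or cycle to the highest number
--         return next((i for i in reversed(frames_lookup) if i < frame),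
--                     frames_lookup[-1])
-- ===== SOURCE B (Python) =====
-- def get_cycle_frame(frame=None, frames_lookup=None, direction="next"):
--     """Nearest frame in direction, cycling: one pass with best/fallback accumulators (no sort)."""
--     if direction not in {"prev", "next"}:
--         raise ValueError("Direction must be either 'next' or 'prev'. "
--                          "Got: {}".format(direction))
--     if not frames_lookup:
--         return
--     if len(frames_lookup) == 1:
--         return frames_lookup[0]
--     if direction == "next":
--         best = None
--         fallback = frames_lookup[0]
--         for i in frames_lookup:
--             if i < fallback:
--                 fallback = i
--             if i > frame and (best is None or i < best):
--                 best = i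
--     else:
--         best = None
--         fallback = frames_lookup[0]
--         for i in frames_lookup:
--             if i > fallback:
--                 fallback = i
--             if i < frame and (best is None or i > best):
--                 best = i
--     return best if best is not None else fallback
-- ===== Notes on version B (the rewrite author's own statement) =====
-- stated objective: alternative
-- what changed: Replaces sort-then-first-match-scan (with a reversed scan for 'prev') by a single O(n) pass keeping two accumulators: the best candidate beyond the frame and the cycle fallback (overall min/max); no sorting and no intermediate lists.
-- outside the precondition, e.g. on get_cycle_frame(1, [1, 2, 3], 'up'): A raises ValueError, B raises ValueError; on get_cycle_frame(None, [1, 2], 'next'): A raises TypeError, B raises TypeError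
import Mathlib
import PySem

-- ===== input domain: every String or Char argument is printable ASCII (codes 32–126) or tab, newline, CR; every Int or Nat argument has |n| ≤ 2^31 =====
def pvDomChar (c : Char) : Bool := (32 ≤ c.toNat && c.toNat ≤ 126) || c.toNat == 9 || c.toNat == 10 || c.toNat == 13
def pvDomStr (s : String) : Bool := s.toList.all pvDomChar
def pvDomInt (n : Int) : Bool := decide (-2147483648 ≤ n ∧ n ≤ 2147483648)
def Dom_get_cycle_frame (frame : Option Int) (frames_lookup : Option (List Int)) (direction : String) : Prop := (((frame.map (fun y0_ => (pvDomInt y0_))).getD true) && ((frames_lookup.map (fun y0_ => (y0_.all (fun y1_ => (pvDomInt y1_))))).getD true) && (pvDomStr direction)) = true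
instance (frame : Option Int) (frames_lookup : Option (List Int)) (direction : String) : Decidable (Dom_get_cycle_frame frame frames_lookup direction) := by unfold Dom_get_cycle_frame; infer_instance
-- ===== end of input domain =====

-- B replaces A's sort + first-match scan by a single pass with best/fallback accumulators (alternative decomposition, no speed claim measured).
-- ===== PORT A =====
-- sort, then first match scanning (forward for "next", backward for "prev"), default = cycle end
def get_cycle_frame (frame : Option Int) (frames_lookup : Option (List Int)) (direction : String) : Option Int :=
  if ¬ (direction = "prev" ∨ direction = "next") then none  -- ValueError (excluded by Pre_)
  else match frames_lookup with
  | none => none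
  | some l =>
    if l = [] then none
    else if l.length = 1 then PySem.List.pyGet? l 0
    else match frame with
      | none => none  -- TypeError comparing None with int (excluded by Pre_)
      | some f =>
        let s := PySem.List.sorted l (fun x => x) false
        if direction = "next" then
          ((s.find? (fun i => decide (f < i))).orElse (fun _ => PySem.List.pyGet? s 0))
        else
          ((s.reverse.find? (fun i => decide (i < f))).orElse (fun _ => PySem.List.pyGet? s (-1)))

-- ===== PORT B =====
-- one pass over the unsorted list; state = (best candidate beyond frame, cycle fallback)
def get_cycle_frame_alt (frame : Option Int) (frames_lookup : Option (List Int)) (direction : String) : Option Int :=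
  if ¬ (direction = "prev" ∨ direction = "next") then none  -- ValueError (excluded by Pre_)
  else match frames_lookup with
  | none => none
  | some l =>
    if l = [] then none
    else if l.length = 1 then PySem.List.pyGet? l 0
    else match frame with
      | none => none  -- TypeError (excluded by Pre_)
      | some f =>
        match l with
        | [] => none  -- unreachable: l ≠ [] on this branch (frames_lookup[0] exists)
        | x :: _ =>
          if direction = "next" then
            let st := l.foldl (fun (st : Option Int × Int) i =>
              (if f < i ∧ (st.1 = none ∨ i < st.1.getD 0) then some i else st.1,
               if i < st.2 then i else st.2)) (none, x)
            some (st.1.getD st.2)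
          else
            let st := l.foldl (fun (st : Option Int × Int) i =>
              (if i < f ∧ (st.1 = none ∨ st.1.getD 0 < i) then some i else st.1,
               if st.2 < i then i else st.2)) (none, x)
            some (st.1.getD st.2)

-- ===== PRECONDITION & SPEC =====
-- Pre_ excludes exactly the inputs where Python A raises: an invalid direction (ValueError),
-- and frame=None with two or more lookup frames (TypeError comparing None with int).
def Pre_get_cycle_frame (frame : Option Int) (frames_lookup : Option (List Int)) (direction : String) : Prop :=
  (direction = "prev" ∨ direction = "next") ∧
  (frame.isSome = true ∨ (frames_lookup.getD []).length ≤ 1)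
instance (frame : Option Int) (frames_lookup : Option (List Int)) (direction : String) : Decidable (Pre_get_cycle_frame frame frames_lookup direction) := by unfold Pre_get_cycle_frame; infer_instance

def pvWitness_get_cycle_frame : Option Int × Option (List Int) × String := (some 3, some [5, 1, 8], "next")

def Spec_get_cycle_frame (frame : Option Int) (frames_lookup : Option (List Int)) (direction : String) (out : Option Int) : Prop := out = get_cycle_frame_alt frame frames_lookup direction
instance (frame : Option Int) (frames_lookup : Option (List Int)) (direction : String) (out : Option Int) : Decidable (Spec_get_cycle_frame frame frames_lookup direction out) := by unfold Spec_get_cycle_frame; infer_instance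

-- ===== CLAIM (what is proved, stated in full; the proofs are below) =====
def Claim_equal_get_cycle_frame : Prop := ∀ (frame : Option Int) (frames_lookup : Option (List Int)) (direction : String), Dom_get_cycle_frame frame frames_lookup direction → Pre_get_cycle_frame frame frames_lookup direction → Spec_get_cycle_frame frame frames_lookup direction (get_cycle_frame frame frames_lookup direction)

-- ===== LEMMAS AND PROOFS =====

-- option-aware min/max accumulators (characterise B's best-candidate update)
def pvObMin (b : Option Int) (i : Int) : Option Int :=
  match b with | none => some i | some v => some (min v i)
def pvObMax (b : Option Int) (i : Int) : Option Int :=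
  match b with | none => some i | some v => some (max v i)

-- generator `next(i for i in xs if p i, d)` = head of filter
theorem pv_find?_eq_head?_filter {α : Type} (p : α → Bool) (l : List α) :
    l.find? p = (l.filter p).head? := by
  induction l with
  | nil => rfl
  | cons x t ih =>
    cases h : p x
    · rw [List.find?_cons_of_neg (by simp [h]), List.filter_cons_of_neg (by simp [h]), ih]
    · rw [List.find?_cons_of_pos h, List.filter_cons_of_pos h, List.head?_cons]

-- min? of any rearrangement of a ≤-sorted list is that list's head
theorem pv_min?_eq_head? (xs ys : List Int) (hp : xs.Perm ys)
    (hs : ys.Pairwise (fun a b => a ≤ b)) :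
    PySem.List.min? xs (fun x => x) = ys.head? := by
  cases ys with
  | nil =>
    have h : xs = [] := List.Perm.eq_nil hp
    subst h; rfl
  | cons m t =>
    obtain ⟨x, xt, rfl⟩ : ∃ x xt, xs = x :: xt := by
      cases xs with
      | nil => exact absurd hp.symm.eq_nil (by simp)
      | cons a b => exact ⟨a, b, rfl⟩
    have hm' : PySem.List.min? (x :: xt) (fun y => y) = some (xt.foldl min x) :=
      PySem.List.min?_id_cons x xt
    set xs := x :: xt
    set m' := xt.foldl min x
    have hmem : m' ∈ xs := PySem.List.min?_mem hm'
    have hmin : ∀ y ∈ xs, m' ≤ y := by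
      intro y hy; exact PySem.List.min?_isMin hm' y hy
    have h1 : m' ≤ m := hmin m (hp.mem_iff.mpr (by simp))
    have h2 : m ≤ m' := by
      have := hp.mem_iff.mp hmem
      rcases List.mem_cons.mp this with h | h
      · exact le_of_eq h.symm
      · exact (List.pairwise_cons.mp hs).1 m' h
    simp [hm', le_antisymm h1 h2]

-- max? of any rearrangement of a ≥-sorted list is that list's head
theorem pv_max?_eq_head? (xs ys : List Int) (hp : xs.Perm ys)
    (hs : ys.Pairwise (fun a b => b ≤ a)) :
    PySem.List.max? xs (fun x => x) = ys.head? := by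
  cases ys with
  | nil =>
    have h : xs = [] := List.Perm.eq_nil hp
    subst h; rfl
  | cons m t =>
    obtain ⟨x, xt, rfl⟩ : ∃ x xt, xs = x :: xt := by
      cases xs with
      | nil => exact absurd hp.symm.eq_nil (by simp)
      | cons a b => exact ⟨a, b, rfl⟩
    have hm' : PySem.List.max? (x :: xt) (fun y => y) = some (xt.foldl max x) :=
      PySem.List.max?_id_cons x xt
    set xs := x :: xt
    set m' := xt.foldl max x
    have hmem : m' ∈ xs := PySem.List.max?_mem hm'
    have hmax : ∀ y ∈ xs, y ≤ m' := by
      intro y hy; exact PySem.List.max?_isMax hm' y hy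
    have h1 : m ≤ m' := hmax m (hp.mem_iff.mpr (by simp))
    have h2 : m' ≤ m := by
      have := hp.mem_iff.mp hmem
      rcases List.mem_cons.mp this with h | h
      · exact le_of_eq h
      · exact (List.pairwise_cons.mp hs).1 m' h
    simp [hm', le_antisymm h2 h1]

-- A's "next" branch = filter + min?-with-fallback formula
theorem pv_next_case (l : List Int) (f : Int) (_hne : l ≠ []) :
    ((PySem.List.sorted l (fun x => x) false).find? (fun i => decide (f < i))).orElse
        (fun _ => PySem.List.pyGet? (PySem.List.sorted l (fun x => x) false) 0) =
      (if l.filter (fun i => decide (f < i)) ≠ [] then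
        PySem.List.min? (l.filter (fun i => decide (f < i))) (fun x => x)
      else PySem.List.min? l (fun x => x)) := by
  set p : Int → Bool := fun i => decide (f < i) with hp
  set s := PySem.List.sorted l (fun x => x) false with hsdef
  have hperm : s.Perm l := PySem.List.sorted_perm l (fun x => x) false
  have hpw : s.Pairwise (fun a b => a ≤ b) := by
    simpa using PySem.List.sorted_pairwise l (fun x => x)
  have hfperm : (l.filter p).Perm (s.filter p) := (hperm.filter p).symm
  have hfpw : (s.filter p).Pairwise (fun a b => a ≤ b) := hpw.filter p
  rw [pv_find?_eq_head?_filter, PySem.List.pyGet?_zero]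
  by_cases he : l.filter p = []
  · have hse : s.filter p = [] := List.Perm.eq_nil (hfperm.symm.trans (by rw [he]))
    rw [hse]
    simp only [he, ne_eq, not_true_eq_false, if_false]
    rw [pv_min?_eq_head? l s hperm.symm hpw]
    cases s <;> rfl
  · have hse : s.filter p ≠ [] := fun h => he (List.Perm.eq_nil (hfperm.trans (by rw [h])))
    simp only [he, ne_eq, not_false_eq_true, if_true]
    rw [pv_min?_eq_head? (l.filter p) (s.filter p) hfperm hfpw]
    cases hsp : s.filter p with
    | nil => exact absurd hsp hse
    | cons a t => rfl

-- A's "prev" branch = filter + max?-with-fallback formula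
theorem pv_prev_case (l : List Int) (f : Int) (_hne : l ≠ []) :
    ((PySem.List.sorted l (fun x => x) false).reverse.find? (fun i => decide (i < f))).orElse
        (fun _ => PySem.List.pyGet? (PySem.List.sorted l (fun x => x) false) (-1)) =
      (if l.filter (fun i => decide (i < f)) ≠ [] then
        PySem.List.max? (l.filter (fun i => decide (i < f))) (fun x => x)
      else PySem.List.max? l (fun x => x)) := by
  set p : Int → Bool := fun i => decide (i < f) with hp
  set s := PySem.List.sorted l (fun x => x) false with hsdef
  set r := s.reverse with hrdef
  have hperm : r.Perm l := (s.reverse_perm).trans (PySem.List.sorted_perm l (fun x => x) false)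
  have hpw : r.Pairwise (fun a b => b ≤ a) := by
    rw [hrdef, List.pairwise_reverse]
    simpa using PySem.List.sorted_pairwise l (fun x => x)
  have hfperm : (l.filter p).Perm (r.filter p) := (hperm.filter p).symm
  have hfpw : (r.filter p).Pairwise (fun a b => b ≤ a) := hpw.filter p
  have hlast : PySem.List.pyGet? s (-1) = r.head? := by
    rw [PySem.List.pyGet?_neg_one, hrdef, List.head?_reverse]
  rw [pv_find?_eq_head?_filter, hlast]
  by_cases he : l.filter p = []
  · have hse : r.filter p = [] := List.Perm.eq_nil (hfperm.symm.trans (by rw [he]))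
    rw [hse]
    simp only [he, ne_eq, not_true_eq_false, if_false]
    rw [pv_max?_eq_head? l r hperm.symm hpw]
    cases r <;> rfl
  · have hse : r.filter p ≠ [] := fun h => he (List.Perm.eq_nil (hfperm.trans (by rw [h])))
    simp only [he, ne_eq, not_false_eq_true, if_true]
    rw [pv_max?_eq_head? (l.filter p) (r.filter p) hfperm hfpw]
    cases hsp : r.filter p with
    | nil => exact absurd hsp hse
    | cons a t => rfl

-- B's one-pass fold splits into (fold of pvObMin over the filter, fold of min) — next direction
theorem pv_fold_next (f : Int) (ys : List Int) (b : Option Int) (m : Int) :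
    ys.foldl (fun (st : Option Int × Int) i =>
      (if f < i ∧ (st.1 = none ∨ i < st.1.getD 0) then some i else st.1,
       if i < st.2 then i else st.2)) (b, m)
    = ((ys.filter (fun i => decide (f < i))).foldl pvObMin b, ys.foldl min m) := by
  induction ys generalizing b m with
  | nil => rfl
  | cons y t ih =>
    rw [List.foldl_cons, ih]
    simp only
    have h2 : (if y < m then y else m) = min m y := by
      rw [min_def]; split_ifs <;> omega
    have h1 : (if f < y ∧ (b = none ∨ y < b.getD 0) then some y else b)
        = (if f < y then pvObMin b y else b) := by
      cases b with
      | none => by_cases hf : f < y <;> simp [pvObMin, hf]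
      | some v =>
        by_cases hf : f < y <;> by_cases hv : y < v <;>
          simp [pvObMin, hf, hv, min_def]
    rw [h1, h2]
    by_cases hf : f < y
    · rw [List.filter_cons_of_pos (by simpa using hf)]
      simp [hf]
    · rw [List.filter_cons_of_neg (by simpa using hf)]
      simp [hf]

-- B's one-pass fold splits into (fold of pvObMax over the filter, fold of max) — prev direction
theorem pv_fold_prev (f : Int) (ys : List Int) (b : Option Int) (m : Int) :
    ys.foldl (fun (st : Option Int × Int) i =>
      (if i < f ∧ (st.1 = none ∨ st.1.getD 0 < i) then some i else st.1,
       if st.2 < i then i else st.2)) (b, m)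
    = ((ys.filter (fun i => decide (i < f))).foldl pvObMax b, ys.foldl max m) := by
  induction ys generalizing b m with
  | nil => rfl
  | cons y t ih =>
    rw [List.foldl_cons, ih]
    simp only
    have h2 : (if m < y then y else m) = max m y := by
      rw [max_def]; split_ifs <;> omega
    have h1 : (if y < f ∧ (b = none ∨ b.getD 0 < y) then some y else b)
        = (if y < f then pvObMax b y else b) := by
      cases b with
      | none => by_cases hf : y < f <;> simp [pvObMax, hf]
      | some v =>
        by_cases hf : y < f <;> by_cases hv : v < y <;>
          simp [pvObMax, hf, hv, max_def] <;> omega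
    rw [h1, h2]
    by_cases hf : y < f
    · rw [List.filter_cons_of_pos (by simpa using hf)]
      simp [hf]
    · rw [List.filter_cons_of_neg (by simpa using hf)]
      simp [hf]

theorem pv_obmin_some (zs : List Int) (v : Int) :
    zs.foldl pvObMin (some v) = some (zs.foldl min v) := by
  induction zs generalizing v with
  | nil => rfl
  | cons z t ih => simp [pvObMin, ih]

theorem pv_obmax_some (zs : List Int) (v : Int) :
    zs.foldl pvObMax (some v) = some (zs.foldl max v) := by
  induction zs generalizing v with
  | nil => rfl
  | cons z t ih => simp [pvObMax, ih]

-- fold of pvObMin/pvObMax from none, with the fallback, = min?/max? with fallback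
theorem pv_alt_next (x : Int) (t : List Int) (f : Int) :
    some ((((x :: t).filter (fun i => decide (f < i))).foldl pvObMin none).getD
      ((x :: t).foldl min x))
    = (if (x :: t).filter (fun i => decide (f < i)) ≠ [] then
        PySem.List.min? ((x :: t).filter (fun i => decide (f < i))) (fun y => y)
      else PySem.List.min? (x :: t) (fun y => y)) := by
  have hfold : (x :: t).foldl min x = t.foldl min x := by
    simp [List.foldl_cons]
  cases hfl : (x :: t).filter (fun i => decide (f < i)) with
  | nil => simp [hfold, PySem.List.min?_id_cons]
  | cons z zs =>
    simp only [ne_eq, reduceCtorEq, not_false_eq_true, if_true, List.foldl_cons]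
    rw [show pvObMin none z = some z from rfl, pv_obmin_some, PySem.List.min?_id_cons]
    rfl

theorem pv_alt_prev (x : Int) (t : List Int) (f : Int) :
    some ((((x :: t).filter (fun i => decide (i < f))).foldl pvObMax none).getD
      ((x :: t).foldl max x))
    = (if (x :: t).filter (fun i => decide (i < f)) ≠ [] then
        PySem.List.max? ((x :: t).filter (fun i => decide (i < f))) (fun y => y)
      else PySem.List.max? (x :: t) (fun y => y)) := by
  have hfold : (x :: t).foldl max x = t.foldl max x := by
    simp [List.foldl_cons]
  cases hfl : (x :: t).filter (fun i => decide (i < f)) with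
  | nil => simp [hfold, PySem.List.max?_id_cons]
  | cons z zs =>
    simp only [ne_eq, reduceCtorEq, not_false_eq_true, if_true, List.foldl_cons]
    rw [show pvObMax none z = some z from rfl, pv_obmax_some, PySem.List.max?_id_cons]
    rfl

-- ===== VERDICT (by name: the statement is the Claim_ definition above) =====
theorem get_cycle_frame_spec : Claim_equal_get_cycle_frame := by
  intro frame frames_lookup direction _hdom hpre
  obtain ⟨hdir, hfr⟩ := hpre
  unfold Spec_get_cycle_frame get_cycle_frame get_cycle_frame_alt
  rw [if_neg (by tauto), if_neg (by tauto)]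
  rcases frames_lookup with _ | l
  · rfl
  · by_cases hl : l = []
    · simp [hl]
    · simp only [hl, if_false]
      by_cases h1 : l.length = 1
      · simp [h1]
      · simp only [h1, if_false]
        rcases frame with _ | f
        · rcases hfr with h | h
          · simp at h
          · have h0 : l.length ≠ 0 := by simpa using hl
            simp only [Option.getD_some] at h
            omega
        · rcases l with _ | ⟨x, t⟩
          · exact absurd rfl hl
          · by_cases hn : direction = "next"
            · simp only [hn, if_true]
              rw [pv_next_case (x :: t) f hl, pv_fold_next]
              exact (pv_alt_next x t f).symm
            · simp only [hn, if_false]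
              rw [pv_prev_case (x :: t) f hl, pv_fold_prev]
              exact (pv_alt_prev x t f).symm
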